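-- pv_equiv track=rewrite | github.com/Albert-Z-Guo/Natural-Language-Processing | Recipe Transformer/vegetarian_scape.py | check_noun_num
-- ===== SOURCE A (Python) =====
-- def check_noun_num(token_tag_pairs):
--     tag_num_dict = {}
--     for pair in token_tag_pairs:
--         if pair[1] not in tag_num_dict:
--             tag_num_dict[pair[1]] = 1
--         else:
--             tag_num_dict[pair[1]] += 1
--
--     criterion_1 = 'NN' in tag_num_dict and tag_num_dict['NN'] >= 2
--     criterion_2 = 'NNS' in tag_num_dict and tag_num_dict['NNS'] >= 2
--     criterion_3 = 'NN' in tag_num_dict and 'NNS' in tag_num_dict and tag_num_dict['NN'] + tag_num_dict['NNS'] >= 2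
--
--     if criterion_1 or criterion_2 or criterion_3:
--         return True
--     else:
--         return False
-- ===== SOURCE B (Python) =====
-- def check_noun_num(token_tag_pairs):
--     count = 0
--     for pair in token_tag_pairs:
--         if pair[1] in ('NN', 'NNS'):
--             count += 1
--     return count >= 2
-- ===== Notes on version B (the rewrite author's own statement) =====
-- stated objective: simpler
-- what changed: The dict of per-tag counts and the three boolean criteria collapse to a single pass maintaining one integer counter of NN/NNS tags compared against 2.
import Mathlib
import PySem

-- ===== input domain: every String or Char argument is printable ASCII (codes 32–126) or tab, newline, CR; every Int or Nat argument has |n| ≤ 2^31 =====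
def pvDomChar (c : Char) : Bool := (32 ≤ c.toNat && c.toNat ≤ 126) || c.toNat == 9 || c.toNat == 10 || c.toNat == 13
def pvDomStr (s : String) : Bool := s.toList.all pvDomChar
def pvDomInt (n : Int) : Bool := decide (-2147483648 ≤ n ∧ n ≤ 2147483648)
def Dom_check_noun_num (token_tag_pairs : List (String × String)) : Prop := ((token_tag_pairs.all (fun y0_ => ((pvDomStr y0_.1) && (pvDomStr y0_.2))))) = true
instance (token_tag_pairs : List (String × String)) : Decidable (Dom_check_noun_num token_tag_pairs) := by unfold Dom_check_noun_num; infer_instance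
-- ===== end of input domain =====

-- ===== PORT A =====
-- B replaces A's per-tag count dict and three criteria by one NN/NNS counter compared with 2 (simpler).
def check_noun_num (token_tag_pairs : List (String × String)) : Bool :=
  let d : PySem.Dict String Int :=
    token_tag_pairs.foldl
      (fun d pair =>
        if !(d.contains pair.2) then d.insert pair.2 1
        else d.insert pair.2 (d.getD pair.2 0 + 1))
      PySem.Dict.empty
  let criterion_1 := d.contains "NN" && decide (d.getD "NN" 0 ≥ 2)
  let criterion_2 := d.contains "NNS" && decide (d.getD "NNS" 0 ≥ 2)
  let criterion_3 := d.contains "NN" && d.contains "NNS" && decide (d.getD "NN" 0 + d.getD "NNS" 0 ≥ 2)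
  if criterion_1 || criterion_2 || criterion_3 then true else false

-- ===== PORT B =====
def check_noun_num_alt (token_tag_pairs : List (String × String)) : Bool :=
  let count : Int :=
    token_tag_pairs.foldl
      (fun count pair => if pair.2 == "NN" || pair.2 == "NNS" then count + 1 else count) 0
  decide (count ≥ 2)

-- ===== PRECONDITION & SPEC =====
def Spec_check_noun_num (token_tag_pairs : List (String × String)) (out : Bool) : Prop := out = check_noun_num_alt token_tag_pairs
instance (token_tag_pairs : List (String × String)) (out : Bool) : Decidable (Spec_check_noun_num token_tag_pairs out) := by unfold Spec_check_noun_num; infer_instance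

-- ===== CLAIM (what is proved, stated in full; the proofs are below) =====
def Claim_equal_check_noun_num : Prop := ∀ (token_tag_pairs : List (String × String)), Dom_check_noun_num token_tag_pairs → Spec_check_noun_num token_tag_pairs (check_noun_num token_tag_pairs)

-- ===== LEMMAS AND PROOFS =====

-- A's dict-building loop is the standard counter loop: afterwards getD t 0 is the count of tag t.
theorem dictFold_getD (l : List (String × String)) (d : PySem.Dict String Int) (t : String) :
    (l.foldl (fun d pair => if !(d.contains pair.2) then d.insert pair.2 1
                            else d.insert pair.2 (d.getD pair.2 0 + 1)) d).getD t 0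
      = d.getD t 0 + ((l.map (·.2)).count t : Int) := by
  induction l generalizing d with
  | nil => simp
  | cons p l ih =>
    simp only [List.foldl_cons, List.map_cons]
    rw [ih]
    by_cases hc : d.contains p.2
    · have hif : ¬ ((!d.contains p.2) = true) := by simp [hc]
      rw [if_neg hif, PySem.Dict.getD_insert]
      by_cases ht : t = p.2
      · subst ht; simp; ring
      · simp [ht, Ne.symm ht]
    · simp only [Bool.not_eq_true] at hc
      have hif : (!d.contains p.2) = true := by simp [hc]
      rw [if_pos hif, PySem.Dict.getD_insert]
      by_cases ht : t = p.2
      · subst ht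
        rw [PySem.Dict.getD_of_not_contains _ _ hc]
        simp; ring
      · simp [ht, Ne.symm ht]

theorem dictFold_contains (l : List (String × String)) (d : PySem.Dict String Int) (t : String) :
    (l.foldl (fun d pair => if !(d.contains pair.2) then d.insert pair.2 1
                            else d.insert pair.2 (d.getD pair.2 0 + 1)) d).contains t
      = (d.contains t || decide (t ∈ l.map (·.2))) := by
  induction l generalizing d with
  | nil => simp
  | cons p l ih =>
    simp only [List.foldl_cons, List.map_cons]
    by_cases hc : d.contains p.2
    · have hif : ¬ ((!d.contains p.2) = true) := by simp [hc]
      rw [if_neg hif, ih, PySem.Dict.contains_insert]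
      rw [Bool.eq_iff_iff]
      by_cases ht : t = p.2 <;> simp [List.mem_cons, ht, hc] <;> tauto
    · simp only [Bool.not_eq_true] at hc
      have hif : (!d.contains p.2) = true := by simp [hc]
      rw [if_pos hif, ih, PySem.Dict.contains_insert]
      rw [Bool.eq_iff_iff]
      by_cases ht : t = p.2 <;> simp [List.mem_cons, ht, hc] <;> tauto

-- B's filtered count splits into the NN count plus the NNS count.
theorem countP_split (l : List (String × String)) :
    l.countP (fun pair => pair.2 == "NN" || pair.2 == "NNS")
      = (l.map (·.2)).count "NN" + (l.map (·.2)).count "NNS" := by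
  induction l with
  | nil => simp
  | cons p l ih =>
    by_cases h1 : p.2 = "NN"
    · simp [h1, ih]; omega
    · by_cases h2 : p.2 = "NNS" <;>
        simp [h1, h2, ih] <;> omega

-- ===== VERDICT (by name: the statement is the Claim_ definition above) =====
theorem check_noun_num_spec : Claim_equal_check_noun_num := by
  intro l _
  unfold Spec_check_noun_num check_noun_num check_noun_num_alt
  simp only []
  rw [dictFold_getD, dictFold_getD, dictFold_contains, dictFold_contains,
      PySem.List.foldl_if_add_one]
  simp only [PySem.Dict.getD_empty, PySem.Dict.contains_empty, Bool.false_or, zero_add]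
  rw [countP_split]
  set n := (l.map (·.2)).count "NN" with hn
  set s := (l.map (·.2)).count "NNS" with hs
  have hnmem : decide ("NN" ∈ l.map (·.2)) = decide (0 < n) := by
    simp [hn, List.count_pos_iff]
  have hsmem : decide ("NNS" ∈ l.map (·.2)) = decide (0 < s) := by
    simp [hs, List.count_pos_iff]
  rw [hnmem, hsmem]
  by_cases h1 : 0 < n <;> by_cases h2 : 0 < s <;>
    simp [h1, h2] <;> omega
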